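-- pv_equiv track=rewrite | github.com/courier-new/advent-of-code | 2024/1/main.py | compute_similarity_score
-- ===== SOURCE A (Python) =====
-- from collections import defaultdict
--
-- def compute_similarity_score(left_ids: list[int], right_ids: list[int]) -> int:
--     appearance_counts = defaultdict(int)
--     for id in right_ids:
--         appearance_counts[id] += 1
--
--     score = 0
--     for id in left_ids:
--         score_for_id = appearance_counts[id] * id
--         score += score_for_id
--
--     return score
-- ===== SOURCE B (Python) =====
-- def compute_similarity_score(left_ids: list[int], right_ids: list[int]) -> int:
--     # Group by distinct value: each distinct left value v contributes
--     # v * (multiplicity of v in left_ids) * (occurrences of v in right_ids).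
--     score = 0
--     for v in set(left_ids):
--         score += v * left_ids.count(v) * right_ids.count(v)
--     return score
-- ===== Notes on version B (the rewrite author's own statement) =====
-- stated objective: alternative
-- what changed: Instead of building a right-list count dictionary and summing per left element, B iterates over the DISTINCT left values (a set) and adds v * left_ids.count(v) * right_ids.count(v), grouping equal left ids into one term.
import Mathlib
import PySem

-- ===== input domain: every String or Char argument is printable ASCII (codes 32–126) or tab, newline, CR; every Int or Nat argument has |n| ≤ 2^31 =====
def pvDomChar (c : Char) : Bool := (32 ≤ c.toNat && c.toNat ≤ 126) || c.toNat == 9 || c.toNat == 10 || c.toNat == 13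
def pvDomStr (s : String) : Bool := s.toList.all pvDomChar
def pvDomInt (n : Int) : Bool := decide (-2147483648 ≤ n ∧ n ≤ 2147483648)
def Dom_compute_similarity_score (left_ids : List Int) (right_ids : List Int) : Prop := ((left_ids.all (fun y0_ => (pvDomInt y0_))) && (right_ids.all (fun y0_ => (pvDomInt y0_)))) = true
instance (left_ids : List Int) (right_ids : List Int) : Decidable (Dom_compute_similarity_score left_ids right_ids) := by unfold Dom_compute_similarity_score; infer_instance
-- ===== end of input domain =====

-- B groups equal left ids: it sums v * left_count(v) * right_count(v) over the DISTINCT left values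
-- instead of A's count-dictionary pass plus per-element accumulation; alternative structure, not faster.

-- ===== PORT A =====
-- appearance_counts = defaultdict(int); for id in right_ids: appearance_counts[id] += 1
-- then score = 0; for id in left_ids: score += appearance_counts[id] * id
def compute_similarity_score (left_ids : List Int) (right_ids : List Int) : Int :=
  let appearance_counts : PySem.Dict Int Int :=
    right_ids.foldl (fun d id => d.modify id 0 (· + 1)) PySem.Dict.empty
  left_ids.foldl (fun score id => score + appearance_counts.getD id 0 * id) 0

-- ===== PORT B =====
-- score = 0; for v in set(left_ids): score += v * left_ids.count(v) * right_ids.count(v)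
-- (the sum over the set is iteration-order independent, so iterating PySem.Set.ofList is exact)
def compute_similarity_score_alt (left_ids : List Int) (right_ids : List Int) : Int :=
  (PySem.Set.ofList left_ids).foldl
    (fun score v =>
      score + v * (PySem.List.count left_ids v : Int) * (PySem.List.count right_ids v : Int)) 0

-- ===== PRECONDITION & SPEC =====
def Spec_compute_similarity_score (left_ids : List Int) (right_ids : List Int) (out : Int) : Prop := out = compute_similarity_score_alt left_ids right_ids
instance (left_ids : List Int) (right_ids : List Int) (out : Int) : Decidable (Spec_compute_similarity_score left_ids right_ids out) := by unfold Spec_compute_similarity_score; infer_instance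

-- ===== CLAIM (what is proved, stated in full; the proofs are below) =====
def Claim_equal_compute_similarity_score : Prop := ∀ (left_ids : List Int) (right_ids : List Int), Dom_compute_similarity_score left_ids right_ids → Spec_compute_similarity_score left_ids right_ids (compute_similarity_score left_ids right_ids)

-- ===== LEMMAS AND PROOFS =====

-- An additive foldl is the sum of the mapped list.
theorem pv_foldl_add_eq_sum (l : List Int) (f : Int → Int) (acc : Int) :
    l.foldl (fun s x => s + f x) acc = acc + (l.map f).sum := by
  induction l generalizing acc with
  | nil => simp
  | cons x xs ih => simp [List.foldl_cons, ih]; ring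

-- Grouping a sum over a list by distinct values (first-occurrence dedup):
-- Σ_{x ∈ l} f x = Σ_{v ∈ dedup l} (count of v in l) * f v.
theorem pv_sum_group_by_value (l : List Int) (f : Int → Int) :
    (l.map f).sum
      = ((PySem.List.dedup l).map (fun v => (l.count v : Int) * f v)).sum := by
  have hperm : (PySem.List.dedup l).Perm l.dedup := by
    apply (List.perm_ext_iff_of_nodup (PySem.List.nodup_dedup l) l.nodup_dedup).mpr
    intro v
    simp
  calc (l.map f).sum
      = ∑ v ∈ l.toFinset, l.count v • f v := Finset.sum_list_map_count l f
    _ = (l.dedup.map (fun v => (l.count v : Int) * f v)).sum := by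
        have h : l.toFinset = l.dedup.toFinset := by ext v; simp
        rw [h, List.sum_toFinset _ l.nodup_dedup]
        simp
    _ = ((PySem.List.dedup l).map (fun v => (l.count v : Int) * f v)).sum :=
        (List.Perm.sum_eq (hperm.map _)).symm

-- ===== VERDICT (by name: the statement is the Claim_ definition above) =====
theorem compute_similarity_score_spec : Claim_equal_compute_similarity_score := by
  intro l r _
  show compute_similarity_score l r = _
  unfold compute_similarity_score compute_similarity_score_alt
  simp only [PySem.Dict.getD_foldl_modify_add_one, PySem.Dict.getD_empty, zero_add]
  rw [pv_foldl_add_eq_sum l (fun id => (r.count id : Int) * id),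
      pv_foldl_add_eq_sum (PySem.Set.ofList l)
        (fun v => v * (PySem.List.count l v : Int) * (PySem.List.count r v : Int))]
  rw [pv_sum_group_by_value l (fun id => (r.count id : Int) * id)]
  simp only [PySem.List.dedup_eq_ofList, PySem.List.count_eq, zero_add]
  congr 1
  apply List.map_congr_left
  intro v _
  ring
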